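-- pv_equiv track=rewrite | github.com/MrBrantCode/unitest_baseline | mut_generate/mist_train_taco/taco_7189/solution.py | CoprimeCount
-- ===== SOURCE A (Python) =====
-- def CoprimeCount(fact, x):
--     k = len(fact)
--     Net = 1 << k
--     ans = 0
--     for mask in range(Net):
--         cnt = 0
--         val = 1
--         for i in range(k):
--             if 1 << i & mask != 0:
--                 val *= fact[i]
--                 cnt += 1
--         if cnt & 1 == 1:
--             ans -= x // val
--         else:
--             ans += x // val
--     return ans
-- ===== SOURCE B (Python) =====
-- def CoprimeCount(fact, x):
--     # incremental inclusion-exclusion: double a (sign, product) list per factor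
--     pairs = [(1, 1)]
--     for f in fact:
--         pairs = pairs + [(-s, v * f) for s, v in pairs]
--     return sum(s * (x // v) for s, v in pairs)
-- ===== Notes on version B (the rewrite author's own statement) =====
-- stated objective: alternative
-- what changed: Instead of enumerating all 2^k bit masks and re-scanning all k bits for each mask, B builds the list of (sign, subset-product) pairs incrementally by doubling it once per factor, one multiplication per subset (intended as faster, O(2^k) vs O(2^k*k); a timing run measured 6.3x at k=16 but both blow up before the largest probe size, so it is recorded as unconfirmed).
import Mathlib
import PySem

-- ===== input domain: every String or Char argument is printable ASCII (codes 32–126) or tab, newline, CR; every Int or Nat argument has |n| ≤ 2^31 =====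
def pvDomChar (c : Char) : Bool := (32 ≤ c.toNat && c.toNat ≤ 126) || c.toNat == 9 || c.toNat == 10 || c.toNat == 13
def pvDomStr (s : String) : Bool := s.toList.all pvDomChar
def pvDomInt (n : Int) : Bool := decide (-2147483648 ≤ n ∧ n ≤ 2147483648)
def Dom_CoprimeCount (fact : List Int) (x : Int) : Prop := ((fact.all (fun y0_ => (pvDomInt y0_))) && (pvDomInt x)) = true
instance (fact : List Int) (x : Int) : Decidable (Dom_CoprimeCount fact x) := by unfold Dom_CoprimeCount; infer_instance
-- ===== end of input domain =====

-- B replaces A's enumeration of all 2^k bit masks (re-scanning all k bits per mask) by incrementally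
-- doubling a (sign, subset-product) list, one multiplication per subset (intended as faster; the timing
-- run measured 6.3x at k=16 but could not confirm it at its largest size, where both programs blow up).

-- ===== PORT A =====
def CoprimeCount (fact : List Int) (x : Int) : Int :=
  let k := fact.length
  let net : Int := (1 : Int) <<< k
  (PySem.List.pyRange 0 net 1).foldl
    (fun ans mask =>
      let cv := (PySem.List.pyRange 0 (k : Int) 1).foldl
        (fun (cv : Int × Int) i =>
          if PySem.Int.band ((1 : Int) <<< i.toNat) mask ≠ 0 then
            (cv.1 + 1, cv.2 * PySem.List.pyGetD fact i 0)
          else cv)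
        (0, 1)
      if PySem.Int.band cv.1 1 = 1 then ans - PySem.Int.floordiv x cv.2
      else ans + PySem.Int.floordiv x cv.2)
    0


-- ===== PORT B =====
def CoprimeCount_alt (fact : List Int) (x : Int) : Int :=
  let pairs := fact.foldl
    (fun (acc : List (Int × Int)) f => acc ++ acc.map (fun sv => (-sv.1, sv.2 * f)))
    [((1 : Int), (1 : Int))]
  pairs.foldl (fun t sv => t + sv.1 * PySem.Int.floordiv x sv.2) 0


-- ===== PRECONDITION & SPEC =====
-- Pre_ excludes exactly the inputs where Python A raises ZeroDivisionError (a zero factor, so some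
-- subset product is 0); Python B raises there too.
def Pre_CoprimeCount (fact : List Int) (x : Int) : Prop := (0 : Int) ∉ fact
instance (fact : List Int) (x : Int) : Decidable (Pre_CoprimeCount fact x) := by unfold Pre_CoprimeCount; infer_instance
def pvWitness_CoprimeCount : List Int × Int := ([2, 3], 7)

def Spec_CoprimeCount (fact : List Int) (x : Int) (out : Int) : Prop := out = CoprimeCount_alt fact x
instance (fact : List Int) (x : Int) (out : Int) : Decidable (Spec_CoprimeCount fact x out) := by unfold Spec_CoprimeCount; infer_instance

-- ===== CLAIM (what is proved, stated in full; the proofs are below) =====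
def Claim_equal_CoprimeCount : Prop := ∀ (fact : List Int) (x : Int), Dom_CoprimeCount fact x → Pre_CoprimeCount fact x → Spec_CoprimeCount fact x (CoprimeCount fact x)

-- ===== LEMMAS AND PROOFS =====
def pvStep (fact : List Int) (mask : Int) (cv : Int × Int) (i : Int) : Int × Int :=
  if PySem.Int.band ((1 : Int) <<< (i.toNat : Int)) mask ≠ 0 then
    (cv.1 + 1, cv.2 * PySem.List.pyGetD fact i 0)
  else cv
def pvInner (fact : List Int) (mask : Int) : Int × Int :=
  (PySem.List.pyRange 0 (fact.length : Int) 1).foldl (pvStep fact mask) (0, 1)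

theorem pv_foldl_fst_nonneg (fact : List Int) (mask : Int) (rng : List Int) (init : Int × Int)
    (h : 0 ≤ init.1) : 0 ≤ (rng.foldl (pvStep fact mask) init).1 := by
  induction rng generalizing init with
  | nil => exact h
  | cons a t ih =>
    simp only [List.foldl_cons]
    apply ih
    unfold pvStep
    split
    · simp; omega
    · exact h

theorem pv_inner_fst_nonneg (fact : List Int) (mask : Int) : 0 ≤ (pvInner fact mask).1 :=
  pv_foldl_fst_nonneg fact mask _ _ (by norm_num)

theorem pv_sign_flip (c : Int) (hc : 0 ≤ c) :
    (if PySem.Int.band (c + 1) 1 = 1 then (-1 : Int) else 1)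
      = -(if PySem.Int.band c 1 = 1 then (-1 : Int) else 1) := by
  rw [PySem.Int.band_of_nonneg (by omega : (0:Int) ≤ c + 1) (by omega : (0:Int) ≤ 1), PySem.Int.band_of_nonneg hc (by omega : (0:Int) ≤ 1)]
  have h2 : (1:Int).toNat = 1 := rfl
  rw [h2, Nat.and_one_is_mod, Nat.and_one_is_mod]
  have h1 : (c + 1).toNat = c.toNat + 1 := by omega
  rw [h1]
  rcases Nat.mod_two_eq_zero_or_one c.toNat with h | h <;>
    simp [Nat.add_mod, h]

theorem pv_shift (n : Nat) : (1 : Int) <<< n = ((2 ^ n : Nat) : Int) := by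
  simp [Int.shiftLeft_eq]

theorem pv_shift_int (n : Nat) : (1 : Int) <<< ((n : Nat) : Int) = ((2 ^ n : Nat) : Int) := by
  rw [show ((1 : Int)) = ((1 : Nat) : Int) from rfl, Int.shiftLeft_natCast]
  norm_num [Nat.shiftLeft_eq]

theorem pv_band_bit (i m : Nat) :
    PySem.Int.band ((1 : Int) <<< ((i : Nat) : Int)) (m : Int) = (((m.testBit i).toNat * 2 ^ i : Nat) : Int) := by
  rw [pv_shift_int, PySem.Int.band_natCast, Nat.land_comm, Nat.and_two_pow]

theorem pv_getD_app_lt (l : List Int) (f : Int) (i : Int) (h0 : 0 ≤ i) (h : i < l.length) :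
    PySem.List.pyGetD (l ++ [f]) i 0 = PySem.List.pyGetD l i 0 := by
  rw [PySem.List.pyGetD_eq_getElem _ 0 h0 (by simp; omega), PySem.List.pyGetD_eq_getElem _ 0 h0 (by omega)]
  rw [List.getElem_append_left (by omega)]

theorem pv_getD_app_last (l : List Int) (f : Int) :
    PySem.List.pyGetD (l ++ [f]) (l.length : Int) 0 = f := by
  rw [PySem.List.pyGetD_eq_getElem _ 0 (by omega) (by simp)]
  simp

-- the first len l steps of the inner loop on l++[f] with mask 2^k*b + j behave like on l with mask j
theorem pv_step_app (l : List Int) (f : Int) (m m' : Int) (i : Int) (hi0 : 0 ≤ i) (hi : i < l.length)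
    (hbit : PySem.Int.band ((1 : Int) <<< (i.toNat : Int)) m = PySem.Int.band ((1 : Int) <<< (i.toNat : Int)) m')
    (cv : Int × Int) : pvStep (l ++ [f]) m cv i = pvStep l m' cv i := by
  unfold pvStep
  rw [hbit, pv_getD_app_lt l f i hi0 hi]

theorem pv_inner_app (l : List Int) (f : Int) (m m' : Int)
    (hbits : ∀ i : Int, 0 ≤ i → i < l.length →
      PySem.Int.band ((1 : Int) <<< (i.toNat : Int)) m = PySem.Int.band ((1 : Int) <<< (i.toNat : Int)) m') :
    pvInner (l ++ [f]) m = pvStep (l ++ [f]) m (pvInner l m') (l.length : Int) := by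
  unfold pvInner
  have hlen : (((l ++ [f]).length : Nat) : Int) = (l.length : Int) + 1 := by simp
  rw [hlen, PySem.List.pyRange_one_succ_right (by positivity), List.foldl_append]
  simp only [List.foldl_cons, List.foldl_nil]
  congr 1
  apply PySem.List.foldl_congr_mem
  intro acc i hi
  rw [PySem.List.mem_pyRange_one] at hi
  exact pv_step_app l f m m' i hi.1 hi.2 (hbits i hi.1 hi.2) acc

theorem pv_inner_app_low (l : List Int) (f : Int) (m : Int) (h0 : 0 ≤ m)
    (h1 : m < ((2 ^ l.length : Nat) : Int)) :
    pvInner (l ++ [f]) m = pvInner l m := by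
  rw [pv_inner_app l f m m (fun _ _ _ => rfl)]
  unfold pvStep
  have hm : m = ((m.toNat : Nat) : Int) := by omega
  have htn : ((l.length : Int)).toNat = l.length := by omega
  rw [htn, hm, pv_band_bit]
  have hbit : m.toNat.testBit l.length = false :=
    Nat.testBit_lt_two_pow (by omega)
  simp [hbit]

theorem pv_inner_app_high (l : List Int) (f : Int) (j : Nat) (hj : j < 2 ^ l.length) :
    pvInner (l ++ [f]) (((2 ^ l.length : Nat) : Int) + (j : Int))
      = ((pvInner l (j : Int)).1 + 1, (pvInner l (j : Int)).2 * f) := by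
  have hmask : ((2 ^ l.length : Nat) : Int) + (j : Int) = (((2 ^ l.length + j : Nat) : Nat) : Int) := by
    push_cast; ring
  rw [hmask]
  rw [pv_inner_app l f _ (j : Int) ?_]
  · unfold pvStep
    have htn : ((l.length : Int)).toNat = l.length := by omega
    rw [htn, pv_band_bit]
    have hbit : (2 ^ l.length + j).testBit l.length = true := by
      rw [Nat.testBit_two_pow_add_eq, Nat.testBit_lt_two_pow hj]
      rfl
    rw [hbit]
    have hne : ((1 * 2 ^ l.length : Nat) : Int) ≠ 0 := by positivity
    simp only [Bool.toNat_true] at hne ⊢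
    rw [if_pos hne, pv_getD_app_last]
  · intro i hi0 hilt
    have hiN : i.toNat < l.length := by omega
    rw [pv_band_bit, pv_band_bit, Nat.testBit_two_pow_add_gt hiN]

def pvSV (fact : List Int) (mask : Int) : Int × Int :=
  ((if PySem.Int.band (pvInner fact mask).1 1 = 1 then -1 else 1), (pvInner fact mask).2)

def pvPairs (fact : List Int) : List (Int × Int) :=
  fact.foldl (fun acc f => acc ++ acc.map (fun sv => (-sv.1, sv.2 * f))) [((1 : Int), (1 : Int))]

theorem pv_sv_high (l : List Int) (f : Int) (j : Nat) (hj : j < 2 ^ l.length) :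
    pvSV (l ++ [f]) (((2 ^ l.length : Nat) : Int) + (j : Int))
      = (-(pvSV l (j : Int)).1, (pvSV l (j : Int)).2 * f) := by
  unfold pvSV
  rw [pv_inner_app_high l f j hj]
  simp only
  rw [pv_sign_flip _ (pv_inner_fst_nonneg l (j : Int))]

theorem pv_sv_low (l : List Int) (f : Int) (m : Int) (h0 : 0 ≤ m)
    (h1 : m < ((2 ^ l.length : Nat) : Int)) : pvSV (l ++ [f]) m = pvSV l m := by
  unfold pvSV
  rw [pv_inner_app_low l f m h0 h1]

theorem pv_pairs_eq (l : List Int) :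
    (PySem.List.pyRange 0 ((1 : Int) <<< l.length) 1).map (pvSV l) = pvPairs l := by
  induction l using List.reverseRecOn with
  | nil => decide
  | append_singleton l f ih =>
    rw [pv_shift] at ih ⊢
    have hlen : (l ++ [f]).length = l.length + 1 := by simp
    rw [hlen]
    have hle : ((2 ^ l.length : Nat) : Int) ≤ ((2 ^ (l.length + 1) : Nat) : Int) := by
      have : (2:Nat) ^ l.length ≤ 2 ^ (l.length + 1) := Nat.pow_le_pow_right (by norm_num) (by omega)
      exact_mod_cast this
    have hsplit := PySem.List.pyRange_one_append 0 ((2 ^ l.length : Nat) : Int)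
      ((2 ^ (l.length + 1) : Nat) : Int) (by positivity) hle
    rw [hsplit, List.map_append]
    have hrhs : pvPairs (l ++ [f]) = pvPairs l ++ (pvPairs l).map (fun sv => (-sv.1, sv.2 * f)) := by
      simp [pvPairs, List.foldl_append]
    have h1 : (PySem.List.pyRange 0 ((2 ^ l.length : Nat) : Int) 1).map (pvSV (l ++ [f]))
        = pvPairs l := by
      rw [← ih]
      apply List.map_congr_left
      intro m hm
      rw [PySem.List.mem_pyRange_one] at hm
      exact pv_sv_low l f m hm.1 hm.2
    have h2 : (PySem.List.pyRange ((2 ^ l.length : Nat) : Int) ((2 ^ (l.length + 1) : Nat) : Int) 1).map (pvSV (l ++ [f]))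
        = (pvPairs l).map (fun sv => (-sv.1, sv.2 * f)) := by
      rw [← ih, PySem.List.pyRange_one, PySem.List.pyRange_one, List.map_map, List.map_map, List.map_map]
      have hc : (((2 ^ (l.length + 1) : Nat) : Int) - ((2 ^ l.length : Nat) : Int)).toNat = 2 ^ l.length := by
        have h : (2:Nat) ^ (l.length + 1) = 2 ^ l.length + 2 ^ l.length := by ring
        omega
      have hc0 : (((2 ^ l.length : Nat) : Int) - 0).toNat = 2 ^ l.length := by omega
      rw [hc, hc0]
      apply List.map_congr_left
      intro j hj
      rw [List.mem_range] at hj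
      simp only [Function.comp]
      rw [zero_add, pv_sv_high l f j hj]
    rw [h1, h2, hrhs]

theorem pv_B_as_sum (fact : List Int) (x : Int) :
    CoprimeCount_alt fact x
      = ((pvPairs fact).map (fun sv => sv.1 * PySem.Int.floordiv x sv.2)).sum := by
  show (pvPairs fact).foldl (fun t sv => t + sv.1 * PySem.Int.floordiv x sv.2) 0 = _
  rw [PySem.List.foldl_add]
  ring

theorem pv_A_as_sum (fact : List Int) (x : Int) :
    CoprimeCount fact x
      = (((PySem.List.pyRange 0 ((1 : Int) <<< fact.length) 1).map (pvSV fact)).map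
          (fun sv => sv.1 * PySem.Int.floordiv x sv.2)).sum := by
  show (PySem.List.pyRange 0 ((1 : Int) <<< fact.length) 1).foldl _ 0 = _
  rw [List.map_map,
    PySem.List.foldl_congr_mem _ _
      (fun ans mask => ans + ((fun sv => sv.1 * PySem.Int.floordiv x sv.2) ∘ pvSV fact) mask) 0 ?_,
    PySem.List.foldl_add]
  · ring
  · intro acc mask _
    have hin : (List.foldl
        (fun (cv : Int × Int) i =>
          if PySem.Int.band ((1 : Int) <<< i.toNat) mask ≠ 0 then
            (cv.1 + 1, cv.2 * PySem.List.pyGetD fact i 0)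
          else cv)
        (0, 1) (PySem.List.pyRange 0 (fact.length : Int) 1)) = pvInner fact mask := rfl
    simp only [hin, Function.comp_apply]
    unfold pvSV
    split
    · simp only [neg_one_mul]; ring
    · simp only [one_mul]

-- ===== VERDICT (by name: the statement is the Claim_ definition above) =====
theorem CoprimeCount_spec : Claim_equal_CoprimeCount := by
  intro fact x _ _
  unfold Spec_CoprimeCount
  rw [pv_A_as_sum, pv_B_as_sum, pv_pairs_eq]
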